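-- pv_equiv track=rewrite | github.com/MohammadRaziei/pip-browse | src/pip_browse/metadata_parser.py | extract_required_python_version
-- ===== SOURCE A (Python) =====
-- from typing import Dict, List, Union, Any
--
-- def extract_required_python_version(metadata: Dict[str, Any]) -> str:
--     """
--     Extract required Python version from metadata.
--
--     Args:
--         metadata: Parsed metadata dictionary
--
--     Returns:
--         Required Python version string, or empty string if not specified
--     """
--     classifiers = metadata.get("Classifier", [])
--     if isinstance(classifiers, str):
--         classifiers = [classifiers]
--
--     # Look for specific versions first (like 3.8, 3.9)
--     specific_versions = []
--     for classifier in classifiers: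
--         if classifier.startswith("Programming Language :: Python ::"):
--             version = classifier.split("::")[-1].strip()
--             if version and version != "Implementation" and "." in version:
--                 specific_versions.append(version)
--
--     # Return the first specific version found
--     if specific_versions:
--         return specific_versions[0]
--
--     # Fallback to generic version (like "3")
--     for classifier in classifiers:
--         if classifier.startswith("Programming Language :: Python ::"):
--             version = classifier.split("::")[-1].strip()
--             if version and version != "Implementation":
--                 return version
--
--     return ""
-- ===== SOURCE B (Python) =====
-- def extract_required_python_version(metadata):
--     """Single pass over the classifiers, tracking the first specific (dotted)
--     and the first generic valid Python version at once."""
--     classifiers = metadata.get("Classifier", [])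
--     if isinstance(classifiers, str):
--         classifiers = [classifiers]
--     first_specific = ""
--     first_generic = ""
--     for classifier in classifiers:
--         if not classifier.startswith("Programming Language :: Python ::"):
--             continue
--         version = classifier.split("::")[-1].strip()
--         if not version or version == "Implementation":
--             continue
--         if not first_generic:
--             first_generic = version
--         if "." in version and not first_specific:
--             first_specific = version
--     return first_specific if first_specific else first_generic
-- ===== Notes on version B (the rewrite author's own statement) =====
-- stated objective: alternative
-- what changed: A builds a list of all dotted versions in one scan and rescans the classifiers for a generic fallback; B makes a single pass that tracks the first specific (dotted) and first generic valid version in two slots and picks between them at the end.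
import Mathlib
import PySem

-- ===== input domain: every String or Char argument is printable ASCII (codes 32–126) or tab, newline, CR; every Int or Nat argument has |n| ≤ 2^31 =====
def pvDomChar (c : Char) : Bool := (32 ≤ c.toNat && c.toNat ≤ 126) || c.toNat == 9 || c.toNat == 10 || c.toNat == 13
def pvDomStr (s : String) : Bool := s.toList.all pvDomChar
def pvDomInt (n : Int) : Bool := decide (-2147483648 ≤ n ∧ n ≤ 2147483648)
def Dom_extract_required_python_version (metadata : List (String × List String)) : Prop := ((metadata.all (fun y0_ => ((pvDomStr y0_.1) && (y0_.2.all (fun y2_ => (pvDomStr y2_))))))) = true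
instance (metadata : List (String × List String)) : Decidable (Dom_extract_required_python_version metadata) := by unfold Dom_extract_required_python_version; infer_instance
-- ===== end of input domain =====

-- B replaces A's two sequential scans (collect-all-dotted, then rescan for a generic
-- fallback) with one pass keeping two candidate slots; alternative decomposition, same cost.


-- ===== PORT A =====
-- classifier.split("::")[-1].strip(); split? is 'some' here since the separator "::" ≠ "",
-- and the split list is never empty, so the defaults are never taken
def pvVersionOf (c : String) : String :=
  PySem.Str.strip (PySem.List.pyGetD ((PySem.Str.split? c "::").getD []) (-1) "")

-- second loop of A: 'for classifier in classifiers: … return version' (early return)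
def pvALoop2 : List String → String
  | [] => ""
  | c :: rest =>
    if PySem.Str.startswith c "Programming Language :: Python ::" = true then
      let version := pvVersionOf c
      if version ≠ "" ∧ version ≠ "Implementation" then version else pvALoop2 rest
    else pvALoop2 rest

-- the 'isinstance(classifiers, str)' branch of the Python is unreachable under the
-- type convention (dict values are lists of strings) and is not ported
def extract_required_python_version (metadata : List (String × List String)) : String :=
  let classifiers := (PySem.Dict.mk metadata).getD "Classifier" []
  let specific_versions := classifiers.foldl (fun acc c =>
    if PySem.Str.startswith c "Programming Language :: Python ::" = true then
      let version := pvVersionOf c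
      if version ≠ "" ∧ version ≠ "Implementation" ∧ PySem.Str.isIn "." version = true then
        acc ++ [version]
      else acc
    else acc) []
  match specific_versions with
  | v :: _ => v
  | [] => pvALoop2 classifiers

-- ===== PORT B =====
def extract_required_python_version_alt (metadata : List (String × List String)) : String :=
  let classifiers := (PySem.Dict.mk metadata).getD "Classifier" []
  let p := classifiers.foldl (fun (acc : String × String) c =>
    if PySem.Str.startswith c "Programming Language :: Python ::" = true then
      let version := pvVersionOf c
      if version = "" ∨ version = "Implementation" then acc
      else
        let fg := if acc.2 = "" then version else acc.2
        let fs := if PySem.Str.isIn "." version = true ∧ acc.1 = "" then version else acc.1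
        (fs, fg)
    else acc) ("", "")
  if p.1 ≠ "" then p.1 else p.2

-- ===== PRECONDITION & SPEC =====
def Spec_extract_required_python_version (metadata : List (String × List String)) (out : String) : Prop := out = extract_required_python_version_alt metadata
instance (metadata : List (String × List String)) (out : String) : Decidable (Spec_extract_required_python_version metadata out) := by unfold Spec_extract_required_python_version; infer_instance

-- ===== CLAIM (what is proved, stated in full; the proofs are below) =====
def Claim_equal_extract_required_python_version : Prop := ∀ (metadata : List (String × List String)), Dom_extract_required_python_version metadata → Spec_extract_required_python_version metadata (extract_required_python_version metadata)

-- ===== LEMMAS AND PROOFS =====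

-- reference lists: all dotted valid versions / all valid versions, in order
def pvDotted : List String → List String
  | [] => []
  | c :: rest =>
    if PySem.Str.startswith c "Programming Language :: Python ::" = true ∧
       pvVersionOf c ≠ "" ∧ pvVersionOf c ≠ "Implementation" ∧
       PySem.Str.isIn "." (pvVersionOf c) = true
    then pvVersionOf c :: pvDotted rest else pvDotted rest

def pvValids : List String → List String
  | [] => []
  | c :: rest =>
    if PySem.Str.startswith c "Programming Language :: Python ::" = true ∧
       pvVersionOf c ≠ "" ∧ pvVersionOf c ≠ "Implementation"
    then pvVersionOf c :: pvValids rest else pvValids rest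

theorem pvAFold (cs : List String) (acc : List String) :
    cs.foldl (fun acc c =>
      if PySem.Str.startswith c "Programming Language :: Python ::" = true then
        let version := pvVersionOf c
        if version ≠ "" ∧ version ≠ "Implementation" ∧ PySem.Str.isIn "." version = true then
          acc ++ [version]
        else acc
      else acc) acc = acc ++ pvDotted cs := by
  induction cs generalizing acc with
  | nil => simp [pvDotted]
  | cons c rest ih =>
    simp only [List.foldl_cons]
    by_cases h1 : PySem.Str.startswith c "Programming Language :: Python ::" = true <;>
    by_cases he : pvVersionOf c = "" <;>
    by_cases hi : pvVersionOf c = "Implementation" <;>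
    by_cases hd : PySem.Str.isIn "." (pvVersionOf c) = true <;>
    simp_all [pvDotted]

theorem pvALoop2_eq (cs : List String) : pvALoop2 cs = (pvValids cs).head?.getD "" := by
  induction cs with
  | nil => simp [pvALoop2, pvValids]
  | cons c rest ih =>
    by_cases h1 : PySem.Str.startswith c "Programming Language :: Python ::" = true <;>
    by_cases he : pvVersionOf c = "" <;>
    by_cases hi : pvVersionOf c = "Implementation" <;>
    simp_all [pvALoop2, pvValids]

theorem pvDotted_ne (cs : List String) : ∀ v ∈ pvDotted cs, v ≠ "" := by
  induction cs with
  | nil => simp [pvDotted]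
  | cons c rest ih =>
    simp only [pvDotted]
    split
    · rename_i h
      intro v hv
      rcases List.mem_cons.1 hv with rfl | hv
      · exact h.2.1
      · exact ih v hv
    · exact ih

set_option maxHeartbeats 2000000 in
theorem pvBFold (cs : List String) (fs fg : String) :
    cs.foldl (fun (acc : String × String) c =>
      if PySem.Str.startswith c "Programming Language :: Python ::" = true then
        let version := pvVersionOf c
        if version = "" ∨ version = "Implementation" then acc
        else
          let fg := if acc.2 = "" then version else acc.2
          let fs := if PySem.Str.isIn "." version = true ∧ acc.1 = "" then version else acc.1
          (fs, fg)
      else acc) (fs, fg)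
    = ((if fs = "" then ((pvDotted cs).head?).getD "" else fs),
       (if fg = "" then ((pvValids cs).head?).getD "" else fg)) := by
  induction cs generalizing fs fg with
  | nil => simp [pvDotted, pvValids]
  | cons c rest ih =>
    simp only [List.foldl_cons]
    by_cases h1 : PySem.Str.startswith c "Programming Language :: Python ::" = true <;>
    by_cases he : pvVersionOf c = "" <;>
    by_cases hi : pvVersionOf c = "Implementation" <;>
    by_cases hd : PySem.Str.isIn "." (pvVersionOf c) = true <;>
    by_cases hfs : fs = "" <;>
    by_cases hfg : fg = "" <;>
    simp_all [pvDotted, pvValids]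

-- ===== VERDICT (by name: the statement is the Claim_ definition above) =====
theorem extract_required_python_version_spec : Claim_equal_extract_required_python_version := by
  intro metadata _
  unfold Spec_extract_required_python_version
  unfold extract_required_python_version extract_required_python_version_alt
  set cs := (PySem.Dict.mk metadata).getD "Classifier" [] with hcs
  simp only [pvAFold cs [], pvBFold cs "" "", List.nil_append]
  cases h : pvDotted cs with
  | nil => simp [pvALoop2_eq]
  | cons v t =>
    have hne : v ≠ "" := pvDotted_ne cs v (h ▸ List.mem_cons_self ..)
    simp [hne]
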